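-- pv_equiv track=rewrite | github.com/pranav-openfabric/Multimodal-AI | multi-app/pipeline_training.py | create_train_data
-- ===== SOURCE A (Python) =====
-- def create_train_data(questions, crypto_names):
--     train_data = []
--     for question in questions:
--         entities = []
--         for name in crypto_names:
--             start = question.find(name)
--             if start != -1:
--                 end = start + len(name)
--                 entities.append((start, end, "CRYPTO"))
--         entities = filter_overlapping_entities(entities)
--         train_data.append((question, {"entities": entities}))
--     return train_data
--
-- def filter_overlapping_entities(entities):
--     # Sort entities by start position
--     entities = sorted(entities, key=lambda x: x[0])
--     filtered_entities = []
--     current_end = -1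
--     for start, end, label in entities:
--         if start >= current_end:
--             filtered_entities.append((start, end, label))
--             current_end = end
--     return filtered_entities
-- ===== SOURCE B (Python) =====
-- def create_train_data(questions, crypto_names):
--     train_data = []
--     for question in questions:
--         spans = []
--         for name in crypto_names:
--             start = question.find(name)
--             if start != -1:
--                 spans.append((start, start + len(name), "CRYPTO"))
--         # counting-style scan: visit start positions 0..len(question) in increasing
--         # order instead of sorting, applying the greedy overlap filter on the fly
--         entities = []
--         current_end = -1
--         for i in range(len(question) + 1):
--             for (start, end, label) in spans:
--                 if start == i and i >= current_end:
--                     entities.append((start, end, label))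
--                     current_end = end
--         train_data.append((question, {"entities": entities}))
--     return train_data
-- ===== Notes on version B (the rewrite author's own statement) =====
-- stated objective: alternative
-- what changed: B replaces A's sort-entities-then-greedy-filter pipeline by a counting-style scan: it visits start positions 0..len(question) in increasing order and applies the greedy overlap filter on the fly, so no comparison sort is performed.
import Mathlib
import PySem

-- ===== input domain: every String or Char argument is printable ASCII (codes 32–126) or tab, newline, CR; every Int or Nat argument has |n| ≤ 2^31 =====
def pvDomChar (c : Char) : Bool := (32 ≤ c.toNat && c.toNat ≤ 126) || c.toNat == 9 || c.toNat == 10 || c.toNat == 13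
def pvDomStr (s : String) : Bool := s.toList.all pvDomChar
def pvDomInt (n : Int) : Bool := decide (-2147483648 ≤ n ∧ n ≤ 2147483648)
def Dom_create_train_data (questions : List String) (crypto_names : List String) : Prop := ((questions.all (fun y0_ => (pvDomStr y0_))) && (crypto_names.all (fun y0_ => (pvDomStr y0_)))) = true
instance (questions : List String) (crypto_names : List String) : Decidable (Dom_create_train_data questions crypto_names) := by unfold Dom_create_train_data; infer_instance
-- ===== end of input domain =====

-- B replaces A's sort-then-greedy-filter by a counting-style scan of start positions in
-- increasing order with the greedy overlap filter applied on the fly (objective: alternative).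

-- ===== PORT A =====
def filter_overlapping_entities (entities : List (Int × Int × String)) : List (Int × Int × String) :=
  let entities' := PySem.List.sorted entities (fun x => x.1)
  let r := entities'.foldl
    (fun (acc : List (Int × Int × String) × Int) e =>
      if e.1 ≥ acc.2 then (acc.1 ++ [(e.1, e.2.1, e.2.2)], e.2.1) else acc)
    ([], -1)
  r.1

def create_train_data (questions : List String) (crypto_names : List String) : List (String × (List (String × List (Int × Int × String)))) :=
  questions.foldl
    (fun train_data question =>
      let entities := crypto_names.foldl
        (fun ents name =>
          let start := PySem.Str.find question name
          if start ≠ -1 then ents ++ [(start, start + PySem.Str.len name, "CRYPTO")] else ents)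
        []
      train_data ++ [(question, [("entities", filter_overlapping_entities entities)])])
    []

-- ===== PORT B =====
def create_train_data_alt (questions : List String) (crypto_names : List String) : List (String × (List (String × List (Int × Int × String)))) :=
  questions.foldl
    (fun train_data question =>
      let spans := crypto_names.foldl
        (fun sp name =>
          let start := PySem.Str.find question name
          if start ≠ -1 then sp ++ [(start, start + PySem.Str.len name, "CRYPTO")] else sp)
        []
      let r := (PySem.List.pyRange 0 (PySem.Str.len question + 1)).foldl
        (fun (acc : List (Int × Int × String) × Int) i =>
          spans.foldl
            (fun acc e =>
              if e.1 = i ∧ i ≥ acc.2 then (acc.1 ++ [(e.1, e.2.1, e.2.2)], e.2.1) else acc)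
            acc)
        ([], -1)
      train_data ++ [(question, [("entities", r.1)])])
    []

-- ===== PRECONDITION & SPEC =====
def Spec_create_train_data (questions : List String) (crypto_names : List String) (out : List (String × (List (String × List (Int × Int × String))))) : Prop := out = create_train_data_alt questions crypto_names
instance (questions : List String) (crypto_names : List String) (out : List (String × (List (String × List (Int × Int × String))))) : Decidable (Spec_create_train_data questions crypto_names out) := by
  unfold Spec_create_train_data
  haveI d2 : DecidableEq (List (Int × Int × String)) := inferInstance
  haveI d4 : DecidableEq (List (String × List (Int × Int × String))) := inferInstance
  haveI d6 : DecidableEq (List (String × List (String × List (Int × Int × String)))) := inferInstance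
  exact d6 _ _

-- ===== CLAIM (what is proved, stated in full; the proofs are below) =====
def Claim_equal_create_train_data : Prop := ∀ (questions : List String) (crypto_names : List String), Dom_create_train_data questions crypto_names → Spec_create_train_data questions crypto_names (create_train_data questions crypto_names)



-- ===== LEMMAS AND PROOFS =====

-- the greedy step of A's filter, and the bucket of entities starting at position i
def pvStep (acc : List (Int × Int × String) × Int) (e : Int × Int × String) : List (Int × Int × String) × Int :=
  if e.1 ≥ acc.2 then (acc.1 ++ [(e.1, e.2.1, e.2.2)], e.2.1) else acc

def pvBucket (xs : List (Int × Int × String)) (i : Int) : List (Int × Int × String) :=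
  xs.filter (fun e => decide (e.1 = i))

theorem pv_insertBy_skip {α : Type} (before : α → α → Bool) (x : α) :
    ∀ (as bs : List α), (∀ a ∈ as, before x a = false) →
      PySem.List.insertBy before x (as ++ bs) = as ++ PySem.List.insertBy before x bs := by
  intro as
  induction as with
  | nil => intro bs _; rfl
  | cons a as ih =>
    intro bs h
    have ha : before x a = false := h a (List.mem_cons_self ..)
    simp only [List.cons_append, PySem.List.insertBy, ha, Bool.false_eq_true, if_false]
    exact congrArg (a :: ·) (ih bs fun y hy => h y (List.mem_cons_of_mem _ hy))

theorem pv_insertBy_front {α : Type} (before : α → α → Bool) (x : α) (bs : List α)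
    (h : ∀ b ∈ bs, before x b = true) : PySem.List.insertBy before x bs = x :: bs := by
  cases bs with
  | nil => rfl
  | cons b bs' => simp [PySem.List.insertBy, h b (List.mem_cons_self ..)]

theorem pv_bucket_append (xs : List (Int × Int × String)) (e : Int × Int × String) (i : Int) :
    pvBucket (xs ++ [e]) i = pvBucket xs i ++ (if e.1 = i then [e] else []) := by
  simp only [pvBucket, List.filter_append, List.filter_cons, List.filter_nil]
  by_cases h : e.1 = i
  · simp [h]
  · simp [h]

theorem pv_flat_bucket_ne (xs : List (Int × Int × String)) (e : Int × Int × String) :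
    ∀ (is : List Int), e.1 ∉ is →
      is.flatMap (pvBucket (xs ++ [e])) = is.flatMap (pvBucket xs) := by
  intro is
  induction is with
  | nil => intro _; rfl
  | cons i rest ih =>
    intro h
    have hi : e.1 ≠ i := fun he => h (he ▸ List.mem_cons_self ..)
    simp only [List.flatMap_cons, pv_bucket_append, if_neg hi, List.append_nil,
      ih (fun hm => h (List.mem_cons_of_mem _ hm))]

theorem pv_bucket_key (xs : List (Int × Int × String)) (i : Int) :
    ∀ a ∈ pvBucket xs i, a.1 = i := by
  intro a ha
  have := (List.mem_filter.mp ha).2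
  simpa using this

theorem pv_insert_flat (e : Int × Int × String) :
    ∀ (is : List Int), is.Pairwise (· < ·) → ∀ (xs : List (Int × Int × String)), e.1 ∈ is →
      PySem.List.insertBy (fun a b => decide (a.1 < b.1)) e (is.flatMap (pvBucket xs))
        = is.flatMap (pvBucket (xs ++ [e])) := by
  intro is
  induction is with
  | nil => intro _ xs hmem; cases hmem
  | cons i rest ih =>
    intro hp xs hmem
    have hlt : ∀ j ∈ rest, i < j := (List.pairwise_cons.mp hp).1
    have hp' : rest.Pairwise (· < ·) := (List.pairwise_cons.mp hp).2
    simp only [List.flatMap_cons]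
    by_cases he : e.1 = i
    · have h1 : ∀ a ∈ pvBucket xs i, (fun a b : Int × Int × String => decide (a.1 < b.1)) e a = false := by
        intro a ha
        have hk := pv_bucket_key xs i a ha
        have : ¬ e.1 < a.1 := by omega
        simpa using this
      rw [pv_insertBy_skip _ _ _ _ h1]
      have h2 : ∀ b ∈ rest.flatMap (pvBucket xs), (fun a b : Int × Int × String => decide (a.1 < b.1)) e b = true := by
        intro b hb
        obtain ⟨j, hj, hbj⟩ := List.mem_flatMap.mp hb
        have hk := pv_bucket_key xs j b hbj
        have hij := hlt j hj
        have : e.1 < b.1 := by omega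
        simpa using this
      rw [pv_insertBy_front _ _ _ h2]
      have hrest : e.1 ∉ rest := by
        intro hm
        have := hlt _ hm
        omega
      rw [pv_flat_bucket_ne xs e rest hrest, pv_bucket_append, if_pos he]
      simp
    · have he' : e.1 ∈ rest := (List.mem_cons.mp hmem).resolve_left he
      have hie := hlt _ he'
      have h1 : ∀ a ∈ pvBucket xs i, (fun a b : Int × Int × String => decide (a.1 < b.1)) e a = false := by
        intro a ha
        have hk := pv_bucket_key xs i a ha
        have : ¬ e.1 < a.1 := by omega
        simpa using this
      rw [pv_insertBy_skip _ _ _ _ h1, ih hp' xs he', pv_bucket_append, if_neg he]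
      simp

theorem pv_sorted_eq_flat (is : List Int) (hp : is.Pairwise (· < ·)) :
    ∀ (xs : List (Int × Int × String)), (∀ x ∈ xs, x.1 ∈ is) →
      PySem.List.sorted xs (fun x => x.1) = is.flatMap (pvBucket xs) := by
  intro xs
  induction xs using List.reverseRecOn with
  | nil =>
    intro _
    rw [PySem.List.sorted_eq_foldl_insertBy]
    simp [pvBucket]
  | append_singleton xs e ih =>
    intro h
    rw [PySem.List.sorted_eq_foldl_insertBy, List.foldl_append, List.foldl_cons, List.foldl_nil,
      ← PySem.List.sorted_eq_foldl_insertBy,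
      ih (fun x hx => h x (List.mem_append_left _ hx))]
    exact pv_insert_flat e is hp xs (h e (List.mem_append_right _ (List.mem_cons_self ..)))

theorem pv_guard_filter (i : Int) :
    ∀ (xs : List (Int × Int × String)) (acc : List (Int × Int × String) × Int),
      xs.foldl (fun acc e => if e.1 = i ∧ i ≥ acc.2 then (acc.1 ++ [(e.1, e.2.1, e.2.2)], e.2.1) else acc) acc
        = (pvBucket xs i).foldl pvStep acc := by
  intro xs
  induction xs with
  | nil => intro acc; rfl
  | cons e xs ih =>
    intro acc
    simp only [List.foldl_cons]
    by_cases he : e.1 = i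
    · have hb : pvBucket (e :: xs) i = e :: pvBucket xs i := by
        simp [pvBucket, he]
      rw [hb, List.foldl_cons, ← ih]
      congr 1
      simp only [pvStep]
      by_cases hc : i ≥ acc.2
      · rw [if_pos ⟨he, hc⟩, if_pos (by omega)]
      · rw [if_neg (fun hand => hc hand.2), if_neg (by omega)]
    · have hb : pvBucket (e :: xs) i = pvBucket xs i := by
        simp [pvBucket, he]
      rw [hb, ← ih, if_neg (fun hand => he hand.1)]

theorem pv_pyRange_pairwise : ∀ (n : Nat) (a : Int), (PySem.List.pyRange a (a + n)).Pairwise (· < ·) := by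
  intro n
  induction n with
  | zero =>
    intro a
    have h0 : a + ((0 : Nat) : Int) = a := by simp
    rw [h0]
    have : PySem.List.pyRange a a = [] := by simp [PySem.List.pyRange]
    rw [this]
    exact List.Pairwise.nil
  | succ m ih =>
    intro a
    have hab : a < a + ((m + 1 : Nat) : Int) := by push_cast; omega
    rw [PySem.List.pyRange_one_cons hab]
    refine List.pairwise_cons.mpr ⟨?_, ?_⟩
    · intro j hj
      have := (PySem.List.mem_pyRange_one.mp hj).1
      omega
    · have hstep : a + ((m + 1 : Nat) : Int) = (a + 1) + ((m : Nat) : Int) := by push_cast; omega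
      rw [hstep]
      exact ih (a + 1)

theorem pv_scan_eq (question : String) (ents : List (Int × Int × String))
    (hb : ∀ e ∈ ents, 0 ≤ e.1 ∧ e.1 < PySem.Str.len question + 1) :
    ((PySem.List.pyRange 0 (PySem.Str.len question + 1)).foldl
        (fun (acc : List (Int × Int × String) × Int) i =>
          ents.foldl
            (fun acc e => if e.1 = i ∧ i ≥ acc.2 then (acc.1 ++ [(e.1, e.2.1, e.2.2)], e.2.1) else acc)
            acc)
        ([], -1)).1
      = filter_overlapping_entities ents := by
  have hfun : (fun (acc : List (Int × Int × String) × Int) i =>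
      ents.foldl
        (fun acc e => if e.1 = i ∧ i ≥ acc.2 then (acc.1 ++ [(e.1, e.2.1, e.2.2)], e.2.1) else acc)
        acc)
      = fun acc i => (pvBucket ents i).foldl pvStep acc := by
    funext acc i
    exact pv_guard_filter i ents acc
  rw [hfun, ← List.foldl_flatMap]
  have hL : PySem.Str.len question + 1 = (0 : Int) + ((question.toList.length + 1 : Nat) : Int) := by
    rw [PySem.Str.len_eq]; push_cast; omega
  have hp : (PySem.List.pyRange 0 (PySem.Str.len question + 1)).Pairwise (· < ·) := by
    rw [hL]; exact pv_pyRange_pairwise _ 0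
  have hmem : ∀ x ∈ ents, x.1 ∈ PySem.List.pyRange 0 (PySem.Str.len question + 1) := by
    intro x hx
    exact PySem.List.mem_pyRange_one.mpr ⟨(hb x hx).1, (hb x hx).2⟩
  rw [← pv_sorted_eq_flat _ hp ents hmem]
  rfl

theorem pv_bounds (question : String) :
    ∀ (names : List String) (acc : List (Int × Int × String)),
      (∀ e ∈ acc, 0 ≤ e.1 ∧ e.1 < PySem.Str.len question + 1) →
      ∀ e ∈ names.foldl
        (fun ents name =>
          let start := PySem.Str.find question name
          if start ≠ -1 then ents ++ [(start, start + PySem.Str.len name, "CRYPTO")] else ents)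
        acc, 0 ≤ e.1 ∧ e.1 < PySem.Str.len question + 1 := by
  intro names
  induction names with
  | nil => intro acc h; simpa using h
  | cons name rest ih =>
    intro acc h
    simp only [List.foldl_cons]
    apply ih
    intro e he
    by_cases hs : PySem.Str.find question name ≠ -1
    · rw [if_pos hs] at he
      rcases List.mem_append.mp he with h1 | h2
      · exact h e h1
      · have heq : e = (PySem.Str.find question name, PySem.Str.find question name + PySem.Str.len name, "CRYPTO") := by
          simpa using h2
        have hge := PySem.Chars.neg_one_le_find question.toList name.toList
        have hle := PySem.Chars.find_le_length question.toList name.toList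
        rw [PySem.Str.find_eq] at hs
        constructor
        · rw [heq]
          simp only [PySem.Str.find_eq]
          omega
        · rw [heq]
          simp only [PySem.Str.find_eq, PySem.Str.len_eq]
          omega
    · rw [if_neg hs] at he
      exact h e he

-- ===== VERDICT (by name: the statement is the Claim_ definition above) =====
theorem create_train_data_spec : Claim_equal_create_train_data := by
  intro questions crypto_names _
  unfold Spec_create_train_data create_train_data create_train_data_alt
  congr 1
  funext train_data question
  simp only
  rw [pv_scan_eq question _ (pv_bounds question crypto_names [] (by simp))]
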